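-- pv_equiv track=rewrite | github.com/the-pawel-wojcik/soc | src/parser.py | get_trans_props
-- ===== SOURCE A (Python) =====
-- def get_trans_props(qchem: list[str]) -> list[list[str]]:
--     trans_props = []
--
--     property = None  # list[str] this variable stores transition property lines
--     for ln, line in enumerate(qchem):
--
--         # There is a new property detected
--         if line.strip().startswith('State A:'):
--             # This can be the first one
--             if property is None:
--                 property = [line]
--                 continue
--             # Or it might be a new one
--             trans_props += [property]
--             property = [line]
--             continue
--         # Just another line
--         else:
--             # If no properties start was detected yet
--             if property is None:
--                 continue
--             # There was a property detected already
--             property += [line]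
--
--     # Save the last property if any was detected
--     if property is not None:
--         trans_props += [property]
--
--     return trans_props
-- ===== SOURCE B (Python) =====
-- def get_trans_props(qchem: list[str]) -> list[list[str]]:
--     def is_header(line: str) -> bool:
--         return line.strip().startswith('State A:')
--
--     n = len(qchem)
--     # skip everything before the first header
--     i = 0
--     while i < n and not is_header(qchem[i]):
--         i += 1
--
--     blocks = []
--     while i < n:
--         # the block runs from this header up to (not including) the next one
--         j = i + 1
--         while j < n and not is_header(qchem[j]):
--             j += 1
--         blocks.append(qchem[i:j])
--         i = j
--     return blocks
-- ===== Notes on version B (the rewrite author's own statement) =====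
-- stated objective: alternative
-- what changed: Replaces A's single pass with an Option-typed accumulator (property None/current block, flushed at headers and at the end) by a block-at-a-time decomposition: drop the prefix before the first header, then repeatedly take a header plus its lines up to the next header as one block.
import Mathlib
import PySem

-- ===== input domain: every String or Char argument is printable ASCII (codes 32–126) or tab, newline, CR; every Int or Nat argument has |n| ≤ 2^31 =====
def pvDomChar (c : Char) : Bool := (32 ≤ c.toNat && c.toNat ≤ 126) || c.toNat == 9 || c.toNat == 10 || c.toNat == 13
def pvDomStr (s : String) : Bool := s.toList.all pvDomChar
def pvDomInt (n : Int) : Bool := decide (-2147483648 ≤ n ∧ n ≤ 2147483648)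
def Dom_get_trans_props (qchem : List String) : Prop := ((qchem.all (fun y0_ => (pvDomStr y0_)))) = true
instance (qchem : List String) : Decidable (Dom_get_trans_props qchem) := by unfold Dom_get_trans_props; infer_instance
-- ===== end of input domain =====

-- B replaces A's single pass with an Option accumulator by a block-at-a-time
-- takeWhile/dropWhile decomposition of the same grouping (objective: alternative).


-- ===== PORT A =====
-- line.strip().startswith('State A:')
def pvIsHeader (line : String) : Bool := PySem.Str.startswith (PySem.Str.strip line) "State A:"

-- A's for-loop over qchem with state (trans_props, property); the trailing
-- 'if property is not None: trans_props += [property]' is the base case.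
def pvALoop : List String → List (List String) → Option (List String) → List (List String)
  | [], trans_props, property =>
      match property with
      | none => trans_props
      | some p => trans_props ++ [p]
  | line :: rest, trans_props, property =>
      if pvIsHeader line then
        match property with
        | none => pvALoop rest trans_props (some [line])
        | some p => pvALoop rest (trans_props ++ [p]) (some [line])
      else
        match property with
        | none => pvALoop rest trans_props none
        | some p => pvALoop rest trans_props (some (p ++ [line]))

def get_trans_props (qchem : List String) : List (List String) :=
  pvALoop qchem [] none

-- ===== PORT B =====
-- B's outer while-loop: each step emits [head] + body (lines until the next
-- header) and continues from that header; terminates since the remainder shrinks.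
def pvAltBlocks : List String → List (List String)
  | [] => []
  | head :: tail =>
      (head :: tail.takeWhile (fun x => !pvIsHeader x))
        :: pvAltBlocks (tail.dropWhile (fun x => !pvIsHeader x))
  termination_by l => l.length
  decreasing_by
    have := List.length_dropWhile_le (p := fun x => !pvIsHeader x) (l := tail)
    simp; omega

-- B's first while-loop skips the prefix before the first header.
def get_trans_props_alt (qchem : List String) : List (List String) :=
  pvAltBlocks (qchem.dropWhile (fun x => !pvIsHeader x))

-- ===== PRECONDITION & SPEC =====
def Spec_get_trans_props (qchem : List String) (out : List (List String)) : Prop := out = get_trans_props_alt qchem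
instance (qchem : List String) (out : List (List String)) : Decidable (Spec_get_trans_props qchem out) := by unfold Spec_get_trans_props; infer_instance

-- ===== CLAIM (what is proved, stated in full; the proofs are below) =====
def Claim_equal_get_trans_props : Prop := ∀ (qchem : List String), Dom_get_trans_props qchem → Spec_get_trans_props qchem (get_trans_props qchem)

-- ===== LEMMAS AND PROOFS =====

-- A's loop with an open block p pending equals: emit p extended by the lines up
-- to the next header, then B's block decomposition of the remainder.
theorem pvALoop_some (ls : List String) :
    ∀ (acc : List (List String)) (p : List String),
      pvALoop ls acc (some p) =
        acc ++ ((p ++ ls.takeWhile (fun x => !pvIsHeader x))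
          :: pvAltBlocks (ls.dropWhile (fun x => !pvIsHeader x))) := by
  induction ls with
  | nil => intro acc p; simp [pvALoop, pvAltBlocks]
  | cons l ls ih =>
      intro acc p
      by_cases h : pvIsHeader l = true
      · simp [pvALoop, h, ih, pvAltBlocks, List.takeWhile, List.dropWhile]
      · simp [pvALoop, h, ih, List.takeWhile, List.dropWhile,
          List.append_assoc]

-- A's loop with no block open yet equals B's decomposition of the remainder
-- after the non-header prefix.
theorem pvALoop_none (ls : List String) :
    ∀ (acc : List (List String)),
      pvALoop ls acc none =
        acc ++ pvAltBlocks (ls.dropWhile (fun x => !pvIsHeader x)) := by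
  induction ls with
  | nil => intro acc; simp [pvALoop, pvAltBlocks]
  | cons l ls ih =>
      intro acc
      by_cases h : pvIsHeader l = true
      · simp [pvALoop, h, pvALoop_some, pvAltBlocks, List.dropWhile]
      · simp [pvALoop, h, ih, List.dropWhile]

-- ===== VERDICT (by name: the statement is the Claim_ definition above) =====
theorem get_trans_props_spec : Claim_equal_get_trans_props := by
  intro qchem _
  unfold Spec_get_trans_props get_trans_props get_trans_props_alt
  simpa using pvALoop_none qchem []
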